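-- pv_equiv track=rewrite | github.com/adriandalion/CMSC-162-Project-1 | filters.py | pad_replicate
-- ===== SOURCE A (Python) =====
-- from typing import List, Tuple
--
-- def pad_replicate(gray: List[List[int]], r: int) -> List[List[int]]:
--     h, w = len(gray), len(gray[0])
--     out = [[0]*(w + 2*r) for _ in range(h + 2*r)]
--     for y in range(h + 2*r):
--         sy = 0 if y < r else (h-1 if y >= h+r else y - r)
--         for x in range(w + 2*r):
--             sx = 0 if x < r else (w-1 if x >= w+r else x - r)
--             out[y][x] = gray[sy][sx]
--     return out
-- ===== SOURCE B (Python) =====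
-- from typing import List
--
-- def pad_replicate(gray: List[List[int]], r: int) -> List[List[int]]:
--     # horizontal pass: pad each row by replicating its edge pixels
--     rows = [[row[0]] * r + row + [row[-1]] * r for row in gray]
--     # vertical pass: replicate (copies of) the first and last padded rows
--     top = [list(rows[0]) for _ in range(r)]
--     bottom = [list(rows[-1]) for _ in range(r)]
--     return top + rows + bottom
-- ===== Notes on version B (the rewrite author's own statement) =====
-- stated objective: simpler
-- what changed: Replaces the per-cell double loop with clamped index arithmetic by a horizontal edge-padding pass over the rows followed by vertical replication of the first and last padded rows.
-- outside the precondition, e.g. on pad_replicate([[1], [2, 3]], 0): A returns [[1], [2]], B returns [[1], [2, 3]]; on pad_replicate([[1]], -1): A returns [], B returns [[1]]; on pad_replicate([[], []], 0): A returns [[], []], B raises IndexError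
import Mathlib
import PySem

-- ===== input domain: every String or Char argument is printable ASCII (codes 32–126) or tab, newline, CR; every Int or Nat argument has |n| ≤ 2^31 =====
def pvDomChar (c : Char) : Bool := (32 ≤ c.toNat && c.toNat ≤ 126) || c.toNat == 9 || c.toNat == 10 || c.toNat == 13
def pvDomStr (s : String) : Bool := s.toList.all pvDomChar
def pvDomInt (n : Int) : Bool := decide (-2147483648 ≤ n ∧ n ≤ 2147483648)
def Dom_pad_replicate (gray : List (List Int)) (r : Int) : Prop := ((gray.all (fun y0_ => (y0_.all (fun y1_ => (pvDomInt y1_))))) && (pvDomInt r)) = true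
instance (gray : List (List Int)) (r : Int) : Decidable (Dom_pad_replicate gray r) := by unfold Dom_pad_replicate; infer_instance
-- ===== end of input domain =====

-- B replaces A's per-cell clamped-index double loop by a horizontal edge-padding pass over the
-- rows followed by vertical replication of the first and last padded rows (simpler decomposition;
-- same return value on Pre_).

-- ===== PORT A =====
def pad_replicate (gray : List (List Int)) (r : Int) : List (List Int) :=
  let h : Int := gray.length
  let w : Int := (PySem.List.pyGetD gray 0 []).length
  (PySem.List.pyRange 0 (h + 2*r) 1).map (fun y =>
    let sy : Int := if y < r then 0 else if y ≥ h + r then h - 1 else y - r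
    (PySem.List.pyRange 0 (w + 2*r) 1).map (fun x =>
      let sx : Int := if x < r then 0 else if x ≥ w + r then w - 1 else x - r
      PySem.List.pyGetD (PySem.List.pyGetD gray sy []) sx 0))

-- ===== PORT B =====
def pad_replicate_alt (gray : List (List Int)) (r : Int) : List (List Int) :=
  let rows := gray.map (fun row =>
    List.replicate r.toNat (PySem.List.pyGetD row 0 0) ++ row ++
      List.replicate r.toNat (PySem.List.pyGetD row (-1) 0))
  let top := List.replicate r.toNat (PySem.List.pyGetD rows 0 [])
  let bottom := List.replicate r.toNat (PySem.List.pyGetD rows (-1) [])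
  top ++ rows ++ bottom

-- ===== PRECONDITION & SPEC =====
-- Pre_ keeps pad's natural domain: a nonempty rectangular image with nonempty rows, and r ≥ 0.
-- It excludes: negative r (A's index arithmetic then yields an accidental cropped/empty result),
-- ragged images (A raises, or silently truncates every row to the first row's width), and
-- zero-width rows (A returns the empty rows when r = 0 but B's row[0] raises there).
def Pre_pad_replicate (gray : List (List Int)) (r : Int) : Prop :=
  gray ≠ [] ∧ 0 ≤ r ∧ gray.headD [] ≠ [] ∧ ∀ row ∈ gray, row.length = (gray.headD []).length
instance (gray : List (List Int)) (r : Int) : Decidable (Pre_pad_replicate gray r) := by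
  unfold Pre_pad_replicate; infer_instance
def pvWitness_pad_replicate : List (List Int) × Int := ([[1, 2], [3, 4]], 2)

def Spec_pad_replicate (gray : List (List Int)) (r : Int) (out : List (List Int)) : Prop := out = pad_replicate_alt gray r
instance (gray : List (List Int)) (r : Int) (out : List (List Int)) : Decidable (Spec_pad_replicate gray r out) := by unfold Spec_pad_replicate; infer_instance

-- ===== CLAIM (what is proved, stated in full; the proofs are below) =====
def Claim_equal_pad_replicate : Prop := ∀ (gray : List (List Int)) (r : Int), Dom_pad_replicate gray r → Pre_pad_replicate gray r → Spec_pad_replicate gray r (pad_replicate gray r)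

-- ===== LEMMAS AND PROOFS =====

lemma map_range_getD {α β : Type} (l : List α) (d : α) (f : α → β) :
    (List.range l.length).map (fun i => f (l.getD i d)) = l.map f := by
  apply List.ext_getElem
  · simp
  · intro i h1 h2
    simp only [List.getElem_map, List.getElem_range]
    rw [List.getD_eq_getElem l d (by simpa using h1)]

lemma clamp_map {α : Type} (f : Int → α) (W r' : Nat) (hW : 0 < W) :
    (PySem.List.pyRange 0 ((W : Int) + 2 * (r' : Int)) 1).map
        (fun x => f (if x < (r' : Int) then 0 else if x ≥ (W : Int) + (r' : Int) then (W : Int) - 1 else x - (r' : Int)))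
      = List.replicate r' (f 0) ++ (List.range W).map (fun (i : Nat) => f (i : Int)) ++
          List.replicate r' (f ((W : Int) - 1)) := by
  rw [PySem.List.pyRange_one]
  have h1 : ((W : Int) + 2 * (r' : Int) - 0).toNat = r' + (W + r') := by omega
  rw [h1, List.range_add, List.range_add]
  simp only [List.map_append, List.map_map, List.append_assoc]
  congr 1
  · rw [List.eq_replicate_iff]
    constructor
    · simp
    · intro b hb
      simp only [List.mem_map, List.mem_range, Function.comp] at hb
      obtain ⟨k, hk, rfl⟩ := hb
      rw [if_pos (by omega)]
  congr 1
  · apply List.map_congr_left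
    intro i hi
    simp only [List.mem_range] at hi
    simp only [Function.comp]
    rw [if_neg (by omega), if_neg (by omega)]
    congr 1
    push_cast
    ring
  · rw [List.eq_replicate_iff]
    constructor
    · simp
    · intro b hb
      simp only [List.mem_map, List.mem_range, Function.comp] at hb
      obtain ⟨k, hk, rfl⟩ := hb
      rw [if_neg (by omega), if_pos (by omega)]

lemma rowpad (row : List Int) (r' : Nat) (h : row ≠ []) :
    (PySem.List.pyRange 0 ((row.length : Int) + 2 * (r' : Int)) 1).map
        (fun x => PySem.List.pyGetD row
          (if x < (r' : Int) then 0 else if x ≥ (row.length : Int) + (r' : Int) then (row.length : Int) - 1 else x - (r' : Int)) 0)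
      = List.replicate r' (PySem.List.pyGetD row 0 0) ++ row ++
          List.replicate r' (PySem.List.pyGetD row (-1) 0) := by
  have hW : 0 < row.length := List.length_pos_of_ne_nil h
  rw [clamp_map (f := fun s => PySem.List.pyGetD row s 0) row.length r' hW]
  congr 1
  · congr 1
    have h2 := map_range_getD row 0 (fun a => a)
    simp only [List.map_id'] at h2
    simp only [PySem.List.pyGetD_natCast]
    exact h2
  · congr 1
    rw [PySem.List.pyGetD_neg_one row 0 h]
    have h3 : (row.length : Int) - 1 = ((row.length - 1 : Nat) : Int) := by omega
    rw [h3, PySem.List.pyGetD_natCast, List.getD_eq_getElem row 0 (by omega),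
      List.getLast_eq_getElem]

theorem pad_equal (gray : List (List Int)) (r : Int) (hne : gray ≠ []) (hr : 0 ≤ r)
    (hw0 : gray.headD [] ≠ []) (heq : ∀ row ∈ gray, row.length = (gray.headD []).length) :
    pad_replicate gray r = pad_replicate_alt gray r := by
  obtain ⟨g0, gs, rfl⟩ := List.exists_cons_of_ne_nil hne
  obtain ⟨r', rfl⟩ : ∃ n : Nat, r = (n : Int) := ⟨r.toNat, (Int.toNat_of_nonneg hr).symm⟩
  simp only [List.headD_cons] at hw0 heq
  unfold pad_replicate pad_replicate_alt
  simp only [Int.toNat_natCast, PySem.List.pyGetD_zero_cons]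
  -- abbreviate
  set hp : List Int → List Int := fun row =>
    List.replicate r' (PySem.List.pyGetD row 0 0) ++ row ++
      List.replicate r' (PySem.List.pyGetD row (-1) 0) with hhp
  -- per-row fact
  have hrow : ∀ row ∈ g0 :: gs,
      (PySem.List.pyRange 0 ((g0.length : Int) + 2 * (r' : Int)) 1).map
        (fun x => PySem.List.pyGetD row
          (if x < (r' : Int) then 0
           else if x ≥ (g0.length : Int) + (r' : Int) then (g0.length : Int) - 1
           else x - (r' : Int)) 0) = hp row := by
    intro row hmem
    have hlen : row.length = g0.length := heq row hmem
    have hne' : row ≠ [] := by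
      intro hnil; rw [hnil] at hlen; exact hw0 (List.eq_nil_of_length_eq_zero hlen.symm)
    rw [← hlen]
    exact rowpad row r' hne'
  rw [clamp_map (f := fun s =>
      (PySem.List.pyRange 0 ((g0.length : Int) + 2 * (r' : Int)) 1).map
        (fun x => PySem.List.pyGetD (PySem.List.pyGetD (g0 :: gs) s [])
          (if x < (r' : Int) then 0
           else if x ≥ (g0.length : Int) + (r' : Int) then (g0.length : Int) - 1
           else x - (r' : Int)) 0))
    (g0 :: gs).length r' (by simp)]
  congr 1
  · congr 1
    · -- top edge
      simp only [PySem.List.pyGetD_zero_cons, List.map_cons]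
      rw [hrow g0 List.mem_cons_self]
    · -- middle rows
      have hmid : ∀ i ∈ List.range (g0 :: gs).length,
          (fun (i : Nat) =>
            (PySem.List.pyRange 0 ((g0.length : Int) + 2 * (r' : Int)) 1).map
              (fun x => PySem.List.pyGetD (PySem.List.pyGetD (g0 :: gs) (i : Int) [])
                (if x < (r' : Int) then 0
                 else if x ≥ (g0.length : Int) + (r' : Int) then (g0.length : Int) - 1
                 else x - (r' : Int)) 0)) i = hp ((g0 :: gs).getD i []) := by
        intro i hi
        simp only [List.mem_range] at hi
        simp only [PySem.List.pyGetD_natCast]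
        exact hrow _ (by rw [List.getD_eq_getElem _ _ hi]; exact List.getElem_mem hi)
      rw [List.map_congr_left hmid, map_range_getD]
  · -- bottom edge
    congr 1
    have hH : ((g0 :: gs).length : Int) - 1 = (((g0 :: gs).length - 1 : Nat) : Int) := by
      simp
    have hg : (g0 :: gs).getD ((g0 :: gs).length - 1) [] = (g0 :: gs).getLast (by simp) := by
      rw [List.getD_eq_getElem _ _ (by simp), List.getLast_eq_getElem]
      rfl
    rw [hH, PySem.List.pyGetD_natCast, hg,
      hrow _ (List.getLast_mem (by simp)),
      PySem.List.pyGetD_neg_one _ _ (by simp)]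
    simp [List.getLast_eq_getElem, -List.map_cons, List.getElem_map]

-- ===== VERDICT (by name: the statement is the Claim_ definition above) =====
theorem pad_replicate_spec : Claim_equal_pad_replicate := by
  intro gray r _ hpre
  exact pad_equal gray r hpre.1 hpre.2.1 hpre.2.2.1 hpre.2.2.2
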